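-- pv_equiv track=rewrite | github.com/NuritEzra/Software-language-structure | targil1/targil1_4_C.py | dictionaryPrime
-- ===== SOURCE A (Python) =====
-- def dictionaryPrime(num):
--
--     dictionary={
--     }
--     for i in range(1,num+1):
--         if prime(i)==True:
--             tp=twin(i)
--             if tp==-1:
--                 dictionary[i]=None
--             else:
--                 dictionary[i]=twin(i)
--     return dictionary
--
-- def twin(num):
--     if prime(num)==True:
--         if prime(num+2)==True:
--             return num+2
--         else:
--             if prime(num-2)==True:
--                 return num-2
--             else:
--                 return -1
--     else:
--         return -1
--
-- def prime(n):
--     if n < 1: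
--         return False
--     for i in range(2, n-1):
--         if n % i == 0:
--             return False
--     return True
-- ===== SOURCE B (Python) =====
-- def dictionaryPrime(num):
--     # Precompute one primality table (sqrt trial division) and do a single pass
--     # with O(1) lookups, instead of re-running an O(n) scan for every prime() call.
--     if num < 1:
--         return {}
--     isp = [_is_prime_quirk(k) for k in range(num + 3)]
--     res = {}
--     for i in range(1, num + 1):
--         if isp[i]:
--             if isp[i + 2]:
--                 res[i] = i + 2
--             elif i >= 3 and isp[i - 2]:
--                 res[i] = i - 2
--             else:
--                 res[i] = None
--     return res
--
-- def _is_prime_quirk(n):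
--     # 1, 2 and 3 count as prime, matching the original helper's loop bound.
--     if n < 1:
--         return False
--     d = 2
--     while d * d <= n:
--         if n % d == 0:
--             return False
--         d += 1
--     return True
-- ===== Notes on version B (the rewrite author's own statement) =====
-- stated objective: faster
-- what changed: B precomputes a single primality table with sqrt-bounded trial division and builds the dictionary in one pass with O(1) table lookups, replacing A's O(n) trial-division scan repeated up to four times per number (prime + twin's three prime calls).
import Mathlib
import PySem

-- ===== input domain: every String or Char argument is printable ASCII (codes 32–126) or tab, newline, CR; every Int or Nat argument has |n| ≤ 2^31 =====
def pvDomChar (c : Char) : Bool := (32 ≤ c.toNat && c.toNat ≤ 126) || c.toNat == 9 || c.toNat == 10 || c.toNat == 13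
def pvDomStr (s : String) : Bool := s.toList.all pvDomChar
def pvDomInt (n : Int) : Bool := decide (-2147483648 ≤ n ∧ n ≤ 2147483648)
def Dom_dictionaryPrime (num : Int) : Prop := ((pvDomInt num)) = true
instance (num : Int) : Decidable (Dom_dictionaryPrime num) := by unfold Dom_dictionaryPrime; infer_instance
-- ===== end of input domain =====

-- B replaces A's repeated O(n) trial-division scans (prime() plus twin()'s three further
-- prime() calls per number) by one precomputed primality table built with sqrt-bounded
-- trial division and a single pass with table lookups (objective: faster).

-- ===== PORT A =====
def primeA (n : Int) : Bool :=
  if n < 1 then false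
  else (PySem.List.pyRange 2 (n - 1) 1).all (fun i => !(PySem.Int.mod n i == 0))

def twinA (num : Int) : Int :=
  if primeA num then
    if primeA (num + 2) then num + 2
    else if primeA (num - 2) then num - 2
    else -1
  else -1

def dictionaryPrime (num : Int) : List (Int × Option Int) :=
  ((PySem.List.pyRange 1 (num + 1) 1).foldl (fun d i =>
      if primeA i then
        let tp := twinA i
        if tp == -1 then d.insert i none
        else d.insert i (some (twinA i))
      else d) PySem.Dict.empty).items

-- ===== PORT B =====
-- the while loop of Source B's _is_prime_quirk
def isPrimeQuirkLoop (n : Int) (d : Int) : Bool :=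
  if _h : d * d ≤ n then
    if PySem.Int.mod n d == 0 then false
    else isPrimeQuirkLoop n (d + 1)
  else true
termination_by (n + 1 - d).toNat
decreasing_by
  have hdn : d ≤ n := by nlinarith [mul_self_nonneg d]
  omega

def isPrimeQuirk (n : Int) : Bool :=
  if n < 1 then false else isPrimeQuirkLoop n 2

-- every pyGetD access is in range (indices 0..num+2 into a table of length num+3, the
-- i-2 one guarded by 3 ≤ i), so the default is never used — exact for Source B's isp[...]
def dictionaryPrime_alt (num : Int) : List (Int × Option Int) :=
  if num < 1 then []
  else
    let isp := (PySem.List.pyRange 0 (num + 3) 1).map isPrimeQuirk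
    ((PySem.List.pyRange 1 (num + 1) 1).foldl (fun d i =>
        if PySem.List.pyGetD isp i false then
          if PySem.List.pyGetD isp (i + 2) false then d.insert i (some (i + 2))
          else if decide (3 ≤ i) && PySem.List.pyGetD isp (i - 2) false then d.insert i (some (i - 2))
          else d.insert i none
        else d) PySem.Dict.empty).items

-- ===== PRECONDITION & SPEC =====
def Spec_dictionaryPrime (num : Int) (out : List (Int × Option Int)) : Prop := out = dictionaryPrime_alt num
instance (num : Int) (out : List (Int × Option Int)) : Decidable (Spec_dictionaryPrime num out) := by unfold Spec_dictionaryPrime; infer_instance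

-- ===== CLAIM (what is proved, stated in full; the proofs are below) =====
def Claim_equal_dictionaryPrime : Prop := ∀ (num : Int), Dom_dictionaryPrime num → Spec_dictionaryPrime num (dictionaryPrime num)

-- ===== LEMMAS AND PROOFS =====

-- the while loop accepts exactly the n with no divisor e ≥ d with e*e ≤ n
theorem isPrimeQuirkLoop_iff (n d : Int) (hd : 2 ≤ d) :
    isPrimeQuirkLoop n d = true ↔ ∀ e, d ≤ e → e * e ≤ n → ¬ e ∣ n := by
  revert hd
  induction d using isPrimeQuirkLoop.induct (n := n) with
  | case1 d h hmod =>
    intro hd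
    rw [isPrimeQuirkLoop, dif_pos h, if_pos hmod]
    simp only [Bool.false_eq_true, false_iff]
    push Not
    refine ⟨d, le_rfl, h, ?_⟩
    exact (PySem.Int.mod_eq_zero_iff_dvd n d).mp (by simpa [beq_iff_eq] using hmod)
  | case2 d h hmod ih =>
    intro hd
    rw [isPrimeQuirkLoop, dif_pos h, if_neg hmod]
    constructor
    · intro h1 e he hee
      rcases eq_or_lt_of_le he with rfl | hlt
      · intro hdvd
        exact hmod (by simpa [beq_iff_eq] using (PySem.Int.mod_eq_zero_iff_dvd n d).mpr hdvd)
      · exact (ih (by omega)).mp h1 e (by omega) hee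
    · intro H
      exact (ih (by omega)).mpr (fun e he hee => H e (by omega) hee)
  | case3 d h =>
    intro hd
    rw [isPrimeQuirkLoop, dif_neg h]
    simp only [true_iff]
    intro e he hee hdvd
    nlinarith

theorem primeA_iff (n : Int) :
    primeA n = true ↔ 1 ≤ n ∧ ∀ i, 2 ≤ i → i < n - 1 → ¬ i ∣ n := by
  unfold primeA
  by_cases hn : n < 1
  · simp [hn]
  · rw [if_neg hn, List.all_eq_true]
    constructor
    · intro H
      refine ⟨by omega, fun i h2 hlt hdvd => ?_⟩
      have := H i (by rw [PySem.List.mem_pyRange_one]; exact ⟨h2, hlt⟩)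
      simp only [Bool.not_eq_eq_eq_not, Bool.not_true, beq_eq_false_iff_ne] at this
      exact this ((PySem.Int.mod_eq_zero_iff_dvd n i).mpr hdvd)
    · rintro ⟨-, H⟩ i hi
      rw [PySem.List.mem_pyRange_one] at hi
      simp only [Bool.not_eq_eq_eq_not, Bool.not_true, beq_eq_false_iff_ne]
      intro hmod
      exact H i hi.1 hi.2 ((PySem.Int.mod_eq_zero_iff_dvd n i).mp hmod)

theorem isPrimeQuirk_iff (n : Int) :
    isPrimeQuirk n = true ↔ 1 ≤ n ∧ ∀ e, 2 ≤ e → e * e ≤ n → ¬ e ∣ n := by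
  unfold isPrimeQuirk
  by_cases hn : n < 1
  · simp [hn]
  · rw [if_neg hn, isPrimeQuirkLoop_iff n 2 le_rfl]
    constructor
    · exact fun H => ⟨by omega, H⟩
    · exact fun H => H.2

-- the sqrt-bounded scan sees a divisor iff A's full scan does
theorem divisor_sqrt_iff (n : Int) (hn : 1 ≤ n) :
    (∀ i, 2 ≤ i → i < n - 1 → ¬ i ∣ n) ↔ (∀ e, 2 ≤ e → e * e ≤ n → ¬ e ∣ n) := by
  constructor
  · intro H e h2 hee hdvd
    exact H e h2 (by nlinarith) hdvd
  · intro H i h2 hlt hdvd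
    by_cases hii : i * i ≤ n
    · exact H i h2 hii hdvd
    · obtain ⟨e, he⟩ := hdvd
      have he1 : 1 ≤ e := by nlinarith
      have he2 : 2 ≤ e := by
        by_contra hco
        have : e = 1 := by omega
        subst this
        simp at he
        omega
      have hie : e < i := by nlinarith
      exact H e he2 (by nlinarith) ⟨i, by rw [he, mul_comm]⟩

theorem primeA_eq (n : Int) : primeA n = isPrimeQuirk n := by
  rw [Bool.eq_iff_iff, primeA_iff, isPrimeQuirk_iff]
  constructor
  · rintro ⟨h1, H⟩
    exact ⟨h1, (divisor_sqrt_iff n h1).mp H⟩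
  · rintro ⟨h1, H⟩
    exact ⟨h1, (divisor_sqrt_iff n h1).mpr H⟩

theorem dictionaryPrime_eq_alt (num : Int) : dictionaryPrime num = dictionaryPrime_alt num := by
  unfold dictionaryPrime dictionaryPrime_alt
  by_cases hnum : num < 1
  · rw [if_pos hnum, PySem.List.pyRange_one_eq_nil (by omega)]
    rfl
  · simp only [if_neg hnum]
    congr 1
    apply PySem.List.foldl_congr_mem
    intro acc i hi
    rw [PySem.List.mem_pyRange_one] at hi
    have hfi : PySem.List.pyGetD ((PySem.List.pyRange 0 (num + 3) 1).map isPrimeQuirk) i false = isPrimeQuirk i :=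
      PySem.List.pyGetD_map_pyRange_of_nonneg _ _ _ _ (by omega) (by omega)
    have hf2 : PySem.List.pyGetD ((PySem.List.pyRange 0 (num + 3) 1).map isPrimeQuirk) (i + 2) false = isPrimeQuirk (i + 2) :=
      PySem.List.pyGetD_map_pyRange_of_nonneg _ _ _ _ (by omega) (by omega)
    simp only [hfi, hf2, ← primeA_eq]
    by_cases hp : primeA i
    · by_cases h2 : primeA (i + 2)
      · have hne : (i + 2 == -1) = false := by simp; omega
        simp [twinA, hp, h2, hne]
      · by_cases hm : primeA (i - 2)
        · have hi3 : 3 ≤ i := by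
            have := (primeA_iff (i - 2)).mp hm
            omega
          have hfm : PySem.List.pyGetD ((PySem.List.pyRange 0 (num + 3) 1).map isPrimeQuirk) (i - 2) false = isPrimeQuirk (i - 2) :=
            PySem.List.pyGetD_map_pyRange_of_nonneg _ _ _ _ (by omega) (by omega)
          have hne : (i - 2 == -1) = false := by simp; omega
          simp only [hfm, ← primeA_eq]
          simp [twinA, hp, h2, hm, hi3, hne]
        · by_cases hi3 : 3 ≤ i
          · have hfm : PySem.List.pyGetD ((PySem.List.pyRange 0 (num + 3) 1).map isPrimeQuirk) (i - 2) false = isPrimeQuirk (i - 2) :=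
              PySem.List.pyGetD_map_pyRange_of_nonneg _ _ _ _ (by omega) (by omega)
            simp only [hfm, ← primeA_eq]
            simp [twinA, hp, h2, hm]
          · simp [twinA, hp, h2, hm, hi3]
    · simp [hp]

-- ===== VERDICT (by name: the statement is the Claim_ definition above) =====
theorem dictionaryPrime_spec : Claim_equal_dictionaryPrime := by
  intro num _
  unfold Spec_dictionaryPrime
  exact dictionaryPrime_eq_alt num
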